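-- pv_equiv track=rewrite | github.com/iamdefender/sorokin | vova.py | build_bigrams
-- ===== SOURCE A (Python) =====
-- from typing import Dict, List, Optional
--
-- def build_bigrams(tokens: List[str]) -> tuple[Dict[str, Dict[str, int]], List[str]]:
--     """Build bigram graph and vocab from token stream."""
--     bigrams: Dict[str, Dict[str, int]] = {}
--     vocab_set = set()
--
--     for i in range(len(tokens) - 1):
--         a, b = tokens[i], tokens[i + 1]
--         vocab_set.add(a)
--         vocab_set.add(b)
--         dst = bigrams.setdefault(a, {})
--         dst[b] = dst.get(b, 0) + 1
--
--     return bigrams, sorted(vocab_set)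
-- ===== SOURCE B (Python) =====
-- from collections import Counter
-- from typing import Dict, List
--
-- def build_bigrams(tokens: List[str]) -> tuple[Dict[str, Dict[str, int]], List[str]]:
--     """Build bigram graph and vocab from token stream."""
--     pairs = list(zip(tokens, tokens[1:]))
--     counts = Counter(pairs)
--     bigrams: Dict[str, Dict[str, int]] = {}
--     for (a, b), c in counts.items():
--         bigrams.setdefault(a, {})[b] = c
--     vocab = {x for p in pairs for x in p}
--     return bigrams, sorted(vocab)
-- ===== Notes on version B (the rewrite author's own statement) =====
-- stated objective: idiomatic
-- what changed: Replaces the index loop that interleaves dict mutation and set updates with a two-pass decomposition: the adjacent pairs are materialised once with zip, flat (a,b)->count counts come from collections.Counter, the nested dict is then built from the Counter's items, and the vocab is a set comprehension over the pairs.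
import Mathlib
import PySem

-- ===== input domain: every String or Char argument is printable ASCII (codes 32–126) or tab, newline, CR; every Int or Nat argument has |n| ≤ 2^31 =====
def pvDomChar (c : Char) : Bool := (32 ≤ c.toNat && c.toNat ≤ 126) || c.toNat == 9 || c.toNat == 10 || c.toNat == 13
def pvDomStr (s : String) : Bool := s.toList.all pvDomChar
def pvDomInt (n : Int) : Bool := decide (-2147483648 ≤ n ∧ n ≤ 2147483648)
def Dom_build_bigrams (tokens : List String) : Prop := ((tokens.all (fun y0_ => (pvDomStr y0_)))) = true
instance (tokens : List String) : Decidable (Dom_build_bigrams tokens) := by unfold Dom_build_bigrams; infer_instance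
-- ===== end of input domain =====

-- B replaces A's index loop (which interleaves the nested-dict mutation with the vocab-set
-- updates) by a two-pass decomposition: zip the adjacent pairs once, count them flat with a
-- Counter, build the nested dict from the Counter's items, and take the vocab from the pairs.

-- ===== PORT A =====
def build_bigrams (tokens : List String) : (List (String × List (String × Int))) × List String :=
  let init : PySem.Dict String (PySem.Dict String Int) × PySem.Set String :=
    (PySem.Dict.empty, PySem.Set.empty)
  let res := (PySem.List.pyRange 0 (PySem.List.len tokens - 1) 1).foldl
    (fun st i =>
      let a := PySem.List.pyGetD tokens i ""
      let b := PySem.List.pyGetD tokens (i + 1) ""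
      -- vocab_set.add(a); vocab_set.add(b); dst = bigrams.setdefault(a, {}); dst[b] = dst.get(b, 0) + 1
      (st.1.modify a PySem.Dict.empty (fun dst => dst.modify b 0 (· + 1)),
       (st.2.add a).add b)) init
  (res.1.items.map (fun p => (p.1, p.2.items)), PySem.List.sorted res.2 (fun x => x) false)

-- ===== PORT B =====
def build_bigrams_alt (tokens : List String) : (List (String × List (String × Int))) × List String :=
  let pairs := tokens.zip (PySem.List.slice tokens (some 1) none)
  let counts := PySem.Dict.counter pairs
  -- for (a, b), c in counts.items(): bigrams.setdefault(a, {})[b] = c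
  let bigrams := counts.items.foldl
    (fun d q => d.modify q.1.1 PySem.Dict.empty (fun dst => dst.insert q.1.2 q.2))
    PySem.Dict.empty
  let vocab := PySem.Set.ofList (pairs.flatMap (fun p => [p.1, p.2]))
  (bigrams.items.map (fun p => (p.1, p.2.items)), PySem.List.sorted vocab (fun x => x) false)

-- ===== PRECONDITION & SPEC =====
def Spec_build_bigrams (tokens : List String) (out : (List (String × List (String × Int))) × List String) : Prop := out = build_bigrams_alt tokens
instance (tokens : List String) (out : (List (String × List (String × Int))) × List String) : Decidable (Spec_build_bigrams tokens out) := by unfold Spec_build_bigrams; infer_instance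

-- ===== CLAIM (what is proved, stated in full; the proofs are below) =====
def Claim_equal_build_bigrams : Prop := ∀ (tokens : List String), Dom_build_bigrams tokens → Spec_build_bigrams tokens (build_bigrams tokens)

-- ===== LEMMAS AND PROOFS =====

-- A's loop step on the bigrams dict, over one pair of adjacent tokens.
def pvStepA (d : PySem.Dict String (PySem.Dict String Int)) (p : String × String) :
    PySem.Dict String (PySem.Dict String Int) :=
  d.modify p.1 PySem.Dict.empty (fun dst => dst.modify p.2 0 (· + 1))

-- B's loop step over a Counter item ((a, b), c).
def pvStepB (d : PySem.Dict String (PySem.Dict String Int)) (q : (String × String) × Int) :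
    PySem.Dict String (PySem.Dict String Int) :=
  d.modify q.1.1 PySem.Dict.empty (fun dst => dst.insert q.1.2 q.2)

-- A's loop step on the vocab set.
def pvVocabStep (v : PySem.Set String) (p : String × String) : PySem.Set String :=
  (v.add p.1).add p.2

def pvAdict (ps : List (String × String)) : PySem.Dict String (PySem.Dict String Int) :=
  ps.foldl pvStepA PySem.Dict.empty

def pvBdict (ps : List (String × String)) : PySem.Dict String (PySem.Dict String Int) :=
  ((PySem.Set.ofList ps).map (fun k => (k, (ps.count k : Int)))).foldl pvStepB PySem.Dict.empty

-- inserting at a key already present commutes (on items) with inserting at any other key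
theorem pv_insert_comm {ν : Type} (d : PySem.Dict String ν) (k k' : String) (v v' : ν)
    (hc : d.contains k = true) (hne : k ≠ k') :
    (d.insert k v).insert k' v' = (d.insert k' v').insert k v := by
  by_cases hc' : d.contains k' = true
  · apply PySem.Dict.ext
    rw [PySem.Dict.items_insert_of_contains _ v' (by simp [PySem.Dict.contains_insert, hc']),
        PySem.Dict.items_insert_of_contains _ v hc,
        PySem.Dict.items_insert_of_contains _ v (by simp [PySem.Dict.contains_insert, hc]),
        PySem.Dict.items_insert_of_contains _ v' hc']
    simp only [List.map_map]
    apply List.map_congr_left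
    intro p _
    by_cases h1 : p.1 = k <;> by_cases h2 : p.1 = k' <;>
      simp [Function.comp, h1, h2, hne, Ne.symm hne]
  · have hc'' : d.contains k' = false := by simpa using hc'
    apply PySem.Dict.ext
    rw [PySem.Dict.items_insert_of_contains _ v (by simp [PySem.Dict.contains_insert, hc]),
        PySem.Dict.items_insert_of_not_contains _ v' (by simp [PySem.Dict.contains_insert, hc'', Ne.symm hne]),
        PySem.Dict.items_insert_of_contains _ v hc,
        PySem.Dict.items_insert_of_not_contains _ v' hc'']
    simp [List.map_append, Ne.symm hne]

-- the inner lookup of A's dict is the running pair count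
theorem pv_Adict_getD (ps : List (String × String)) (a b : String) :
    ((pvAdict ps).getD a PySem.Dict.empty).getD b 0 = (ps.count (a, b) : Int) := by
  induction ps using List.reverseRecOn with
  | nil => simp [pvAdict, PySem.Dict.getD_empty]
  | append_singleton ps p ih =>
    obtain ⟨pa, pb⟩ := p
    rw [pvAdict, List.foldl_append]
    show ((pvStepA (pvAdict ps) (pa, pb)).getD a PySem.Dict.empty).getD b 0 = _
    rw [pvStepA, PySem.Dict.getD_modify]
    by_cases ha : a = pa
    · subst ha
      rw [if_pos rfl, PySem.Dict.getD_modify]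
      by_cases hb : b = pb
      · subst hb
        rw [if_pos rfl, ih]
        simp [List.count_append]
      · rw [if_neg hb, ih]
        have : List.count (a, b) [(a, pb)] = 0 := by
          simp [List.count_singleton]; intro h; exact absurd h.symm hb
        simp [List.count_append, this]
    · rw [if_neg ha, ih]
      have : List.count (a, b) [(pa, pb)] = 0 := by
        simp [List.count_singleton]; intro h; exact absurd h.symm ha
      simp [List.count_append, this]

-- incrementing the count at a pair p already present commutes with one B-step at q ≠ p
theorem pv_step_comm (p : String × String) (q : (String × String) × Int)
    (d : PySem.Dict String (PySem.Dict String Int)) (hq : q.1 ≠ p)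
    (h1 : d.contains p.1 = true)
    (h2 : (d.getD p.1 PySem.Dict.empty).contains p.2 = true) :
    pvStepB (d.modify p.1 PySem.Dict.empty (fun dst => dst.modify p.2 0 (· + 1))) q
      = (pvStepB d q).modify p.1 PySem.Dict.empty (fun dst => dst.modify p.2 0 (· + 1)) := by
  simp only [pvStepB, PySem.Dict.modify]
  by_cases hq1 : q.1.1 = p.1
  · have hq2 : q.1.2 ≠ p.2 := by
      intro h; exact hq (Prod.ext hq1 h)
    rw [hq1]
    rw [PySem.Dict.getD_insert_self, PySem.Dict.insert_insert_self,
        PySem.Dict.getD_insert_self, PySem.Dict.insert_insert_self,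
        PySem.Dict.getD_insert_of_ne _ _ _ (Ne.symm hq2)]
    congr 1
    exact pv_insert_comm _ _ _ _ _ h2 (Ne.symm hq2)
  · rw [PySem.Dict.getD_insert_of_ne _ _ _ hq1,
        PySem.Dict.getD_insert_of_ne _ _ _ (Ne.symm hq1)]
    exact pv_insert_comm _ _ _ _ _ h1 (Ne.symm hq1)

-- … and with a whole fold of B-steps over Counter items whose pairs differ from p
theorem pv_fold_comm (p : String × String) (L : List ((String × String) × Int))
    (d : PySem.Dict String (PySem.Dict String Int))
    (hL : ∀ q ∈ L, q.1 ≠ p)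
    (h1 : d.contains p.1 = true)
    (h2 : (d.getD p.1 PySem.Dict.empty).contains p.2 = true) :
    L.foldl pvStepB (d.modify p.1 PySem.Dict.empty (fun dst => dst.modify p.2 0 (· + 1)))
      = (L.foldl pvStepB d).modify p.1 PySem.Dict.empty (fun dst => dst.modify p.2 0 (· + 1)) := by
  induction L generalizing d with
  | nil => rfl
  | cons q L ih =>
    simp only [List.foldl_cons]
    rw [pv_step_comm p q d (hL q (by simp)) h1 h2]
    apply ih _ (fun r hr => hL r (by simp [hr]))
    · simp only [pvStepB, PySem.Dict.modify, PySem.Dict.contains_insert]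
      simp [h1]
    · simp only [pvStepB, PySem.Dict.modify]
      by_cases hq1 : q.1.1 = p.1
      · rw [hq1, PySem.Dict.getD_insert_self, PySem.Dict.contains_insert]
        simp [h2]
      · rw [PySem.Dict.getD_insert_of_ne _ _ _ (Ne.symm hq1)]
        exact h2

-- bumping the count of one key p ∈ L by 1 is a trailing (p.1, p.2) increment
theorem pv_bump (p : String × String) (L : List (String × String)) (c : String × String → Int)
    (hnd : L.Nodup) (hp : p ∈ L) (d : PySem.Dict String (PySem.Dict String Int)) :
    (L.map (fun k => (k, c k + if k = p then 1 else 0))).foldl pvStepB d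
      = ((L.map (fun k => (k, c k))).foldl pvStepB d).modify p.1 PySem.Dict.empty
          (fun dst => dst.modify p.2 0 (· + 1)) := by
  induction L generalizing d with
  | nil => exact absurd hp (by simp)
  | cons q L ih =>
    rcases List.nodup_cons.mp hnd with ⟨hqL, hndL⟩
    simp only [List.map_cons, List.foldl_cons]
    by_cases hqp : q = p
    · subst hqp
      rw [if_pos rfl]
      have hmap : L.map (fun k => (k, c k + if k = q then 1 else 0)) = L.map (fun k => (k, c k)) := by
        apply List.map_congr_left
        intro k hk
        have : k ≠ q := fun h => hqL (h ▸ hk)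
        simp [this]
      rw [hmap]
      have hstep : pvStepB d (q, c q + 1)
          = (pvStepB d (q, c q)).modify q.1 PySem.Dict.empty (fun dst => dst.modify q.2 0 (· + 1)) := by
        simp only [pvStepB, PySem.Dict.modify]
        rw [PySem.Dict.getD_insert_self, PySem.Dict.insert_insert_self,
            PySem.Dict.getD_insert_self, PySem.Dict.insert_insert_self]
      rw [hstep]
      apply pv_fold_comm
      · intro r hr
        rcases List.mem_map.mp hr with ⟨k, hk, rfl⟩
        exact fun h => hqL (h ▸ hk)
      · simp only [pvStepB, PySem.Dict.modify, PySem.Dict.contains_insert]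
        simp
      · simp only [pvStepB, PySem.Dict.modify]
        rw [PySem.Dict.getD_insert_self, PySem.Dict.contains_insert]
        simp
    · rw [if_neg hqp]
      simp only [add_zero]
      have hpL : p ∈ L := by
        rcases List.mem_cons.mp hp with h | h
        · exact absurd h.symm hqp
        · exact h
      exact ih hndL hpL _

-- B's dict built from the Counter's items equals A's incrementally built dict
theorem pv_dict_eq (ps : List (String × String)) : pvBdict ps = pvAdict ps := by
  induction ps using List.reverseRecOn with
  | nil => rfl
  | append_singleton ps p ih =>
    have hA : pvAdict (ps ++ [p]) = pvStepA (pvAdict ps) p := by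
      rw [pvAdict, List.foldl_append]; rfl
    by_cases hmem : p ∈ ps
    · -- the pair p was already seen: the Counter keeps its keys, p's count grows by 1
      have hset : PySem.Set.ofList (ps ++ [p]) = PySem.Set.ofList ps := by
        rw [PySem.Set.ofList_eq_foldl, List.foldl_append, ← PySem.Set.ofList_eq_foldl]
        simp only [List.foldl_cons, List.foldl_nil, PySem.Set.add]
        rw [if_pos]
        simp only [PySem.Set.contains, List.contains_iff_mem]
        exact (PySem.Set.mem_ofList ps p).mpr hmem
      have hmap : (PySem.Set.ofList (ps ++ [p])).map (fun k => (k, ((ps ++ [p]).count k : Int)))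
          = (PySem.Set.ofList ps).map (fun k => (k, (ps.count k : Int) + if k = p then 1 else 0)) := by
        rw [hset]
        apply List.map_congr_left
        intro k _
        by_cases hk : k = p
        · subst hk; simp [List.count_append]
        · have : List.count k [p] = 0 := by
            simp [List.count_singleton]; intro h; exact absurd h.symm hk
          simp [List.count_append, this, hk]
      rw [pvBdict, hmap, pv_bump p _ _ (PySem.Set.nodup_ofList ps)
            ((PySem.Set.mem_ofList ps p).mpr hmem), hA]
      rw [← pvBdict, ih]
      rfl
    · -- a fresh pair: the Counter gains key p with count 1 at the end
      have hset : PySem.Set.ofList (ps ++ [p]) = PySem.Set.ofList ps ++ [p] := by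
        rw [PySem.Set.ofList_eq_foldl, List.foldl_append, ← PySem.Set.ofList_eq_foldl]
        simp only [List.foldl_cons, List.foldl_nil, PySem.Set.add]
        rw [if_neg]
        simp only [PySem.Set.contains, List.contains_iff_mem]
        exact fun h => hmem ((PySem.Set.mem_ofList ps p).mp h)
      have hcnt : List.count p (ps ++ [p]) = 1 := by
        rw [List.count_append, List.count_eq_zero.mpr hmem]
        simp
      have hmap : (PySem.Set.ofList (ps ++ [p])).map (fun k => (k, ((ps ++ [p]).count k : Int)))
          = (PySem.Set.ofList ps).map (fun k => (k, (ps.count k : Int))) ++ [(p, 1)] := by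
        rw [hset, List.map_append]
        congr 1
        · apply List.map_congr_left
          intro k hk
          have hk' : k ≠ p := fun h => hmem (h ▸ (PySem.Set.mem_ofList ps k).mp hk)
          have : List.count k [p] = 0 := by
            simp [List.count_singleton]; intro h; exact absurd h.symm hk'
          simp [List.count_append, this]
        · simp [List.count_append, List.count_eq_zero.mpr hmem]
      rw [pvBdict, hmap, List.foldl_append, ← pvBdict, ih, hA]
      simp only [List.foldl_cons, List.foldl_nil]
      show pvStepB (pvAdict ps) (p, 1) = pvStepA (pvAdict ps) p
      simp only [pvStepB, pvStepA, PySem.Dict.modify]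
      congr 2
      rw [show ((pvAdict ps).getD p.1 PySem.Dict.empty).getD p.2 0 = (List.count (p.1, p.2) ps : Int) from pv_Adict_getD ps p.1 p.2]
      rw [List.count_eq_zero.mpr (by simpa using hmem)]
      rfl

-- A's interleaved vocab-set updates are the set of the flattened pairs
theorem pv_vocab_eq (ps : List (String × String)) :
    ps.foldl pvVocabStep PySem.Set.empty
      = PySem.Set.ofList (ps.flatMap (fun p => [p.1, p.2])) := by
  rw [PySem.Set.ofList_eq_foldl, List.foldl_flatMap]
  rfl

theorem pv_rangefold {σ : Type} (f : σ → String × String → σ) (xs : List String) :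
    ∀ (x : String) (s : σ),
    (List.range xs.length).foldl
      (fun st k => f st ((x :: xs).getD k "", (x :: xs).getD (k + 1) "")) s
      = ((x :: xs).zip xs).foldl f s := by
  induction xs with
  | nil => intro x s; rfl
  | cons y t ih =>
    intro x s
    simp only [List.length_cons]
    rw [List.range_succ_eq_map, List.foldl_cons, List.foldl_map]
    show (List.range t.length).foldl
        (fun st k => f st ((x :: y :: t).getD (k + 1) "", (x :: y :: t).getD (k + 1 + 1) "")) (f s (x, y))
      = _
    refine Eq.trans (PySem.List.foldl_congr_mem _ _ _ _ ?_) (Eq.trans (ih y (f s (x, y))) rfl)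
    intro st k _
    rw [List.getD_cons_succ, List.getD_cons_succ]

-- A's 'for i in range(len(tokens) - 1)' index loop is a fold over the adjacent pairs
theorem pv_range_zip {σ : Type} (f : σ → String × String → σ) (xs : List String) (s : σ) :
    (PySem.List.pyRange 0 (PySem.List.len xs - 1) 1).foldl
      (fun st i => f st (PySem.List.pyGetD xs i "", PySem.List.pyGetD xs (i + 1) "")) s
      = (xs.zip xs.tail).foldl f s := by
  cases xs with
  | nil =>
    rw [show PySem.List.len ([] : List String) - 1 = -1 from rfl,
        PySem.List.pyRange_one_eq_nil (by omega)]
    rfl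
  | cons x t =>
    have hlen : PySem.List.len (x :: t) - 1 = (t.length : Int) := by
      simp [PySem.List.len_eq]
    rw [hlen, PySem.List.pyRange_zero_nat, List.foldl_map]
    refine Eq.trans (PySem.List.foldl_congr_mem _ _ _ _ ?_) (pv_rangefold f t x s)
    intro st k _
    have h1 : ((k : Int) + 1) = ((k + 1 : Nat) : Int) := by push_cast; ring
    rw [h1, PySem.List.pyGetD_natCast, PySem.List.pyGetD_natCast]

-- A's whole loop, split into its dict component and its vocab component
theorem pv_A_loop (tokens : List String) :
    (PySem.List.pyRange 0 (PySem.List.len tokens - 1) 1).foldl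
      (fun st i =>
        (st.1.modify (PySem.List.pyGetD tokens i "") PySem.Dict.empty
           (fun dst => dst.modify (PySem.List.pyGetD tokens (i + 1) "") 0 (· + 1)),
         (st.2.add (PySem.List.pyGetD tokens i "")).add (PySem.List.pyGetD tokens (i + 1) "")))
      ((PySem.Dict.empty : PySem.Dict String (PySem.Dict String Int)), (PySem.Set.empty : PySem.Set String))
      = (pvAdict (tokens.zip tokens.tail),
         (tokens.zip tokens.tail).foldl pvVocabStep PySem.Set.empty) := by
  rw [show (fun (st : PySem.Dict String (PySem.Dict String Int) × PySem.Set String) (i : Int) =>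
        (st.1.modify (PySem.List.pyGetD tokens i "") PySem.Dict.empty
           (fun dst => dst.modify (PySem.List.pyGetD tokens (i + 1) "") 0 (· + 1)),
         (st.2.add (PySem.List.pyGetD tokens i "")).add (PySem.List.pyGetD tokens (i + 1) "")))
      = (fun st i => (fun (st : PySem.Dict String (PySem.Dict String Int) × PySem.Set String)
            (p : String × String) => (pvStepA st.1 p, pvVocabStep st.2 p)) st
          (PySem.List.pyGetD tokens i "", PySem.List.pyGetD tokens (i + 1) "")) from rfl]
  rw [pv_range_zip (fun (st : PySem.Dict String (PySem.Dict String Int) × PySem.Set String)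
        (p : String × String) => (pvStepA st.1 p, pvVocabStep st.2 p)) tokens
        (PySem.Dict.empty, PySem.Set.empty)]
  exact PySem.List.foldl_prod_mk pvStepA pvVocabStep _ _ _

-- ===== VERDICT (by name: the statement is the Claim_ definition above) =====
theorem build_bigrams_spec : Claim_equal_build_bigrams := by
  intro tokens _
  unfold Spec_build_bigrams
  have hA : build_bigrams tokens
      = ((pvAdict (tokens.zip tokens.tail)).items.map (fun p => (p.1, p.2.items)),
         PySem.List.sorted ((tokens.zip tokens.tail).foldl pvVocabStep PySem.Set.empty)
           (fun x => x) false) := by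
    unfold build_bigrams
    dsimp only
    rw [pv_A_loop]
  have hB : build_bigrams_alt tokens
      = ((pvBdict (tokens.zip tokens.tail)).items.map (fun p => (p.1, p.2.items)),
         PySem.List.sorted
           (PySem.Set.ofList ((tokens.zip tokens.tail).flatMap (fun p => [p.1, p.2])))
           (fun x => x) false) := by
    unfold build_bigrams_alt
    dsimp only
    rw [PySem.List.slice_from_one, PySem.Dict.items_counter]
    rfl
  rw [hA, hB, pv_dict_eq, pv_vocab_eq]
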